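-- pv_equiv track=rewrite | github.com/paulilioaica/BPE-Tokenizer | tokenizer.py | get_symbol_freq
-- ===== SOURCE A (Python) =====
-- def get_symbol_freq(all_words):
--     pairs = {}
--     for word_tokens in all_words:
--         tokens = word_tokens.split()
--         for i in range(len(tokens) - 1):
--             if tokens[i] == '|' or tokens[i + 1] == '|':
--                 continue
--             pair = (tokens[i], tokens[i + 1])
--             pairs[pair] = pairs.get(pair, 0) + 1
--     return pairs
-- ===== SOURCE B (Python) =====
-- def _runs(tokens):
--     runs = []
--     run = []
--     for tok in tokens:
--         if tok == '|':
--             if run: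
--                 runs.append(run)
--             run = []
--         else:
--             run.append(tok)
--     if run:
--         runs.append(run)
--     return runs
--
--
-- def get_symbol_freq(all_words):
--     pairs = {}
--     for word_tokens in all_words:
--         for run in _runs(word_tokens.split()):
--             for pair in zip(run, run[1:]):
--                 pairs[pair] = pairs.get(pair, 0) + 1
--     return pairs
-- ===== Notes on version B (the rewrite author's own statement) =====
-- stated objective: alternative
-- what changed: Instead of an indexed loop over token positions with a per-pair separator test, B splits each word's token list into maximal '|'-free runs and counts the adjacent pairs within each run.
import Mathlib
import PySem

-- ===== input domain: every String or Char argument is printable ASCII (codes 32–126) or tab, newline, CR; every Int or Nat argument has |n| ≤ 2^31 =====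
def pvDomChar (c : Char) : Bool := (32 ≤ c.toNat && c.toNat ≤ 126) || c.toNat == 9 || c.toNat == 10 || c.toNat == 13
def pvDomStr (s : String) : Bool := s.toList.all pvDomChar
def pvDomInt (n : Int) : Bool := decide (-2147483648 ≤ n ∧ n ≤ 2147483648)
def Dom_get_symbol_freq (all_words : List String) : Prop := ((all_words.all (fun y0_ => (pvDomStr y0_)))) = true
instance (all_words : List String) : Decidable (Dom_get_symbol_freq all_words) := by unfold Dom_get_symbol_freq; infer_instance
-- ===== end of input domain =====

-- B replaces A's indexed loop with its per-pair separator test by a split of the token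
-- list into maximal '|'-free runs, counting adjacent pairs within each run (alternative
-- decomposition, same cost).

-- ===== PORT A =====
-- tokens[i] / tokens[i+1]: indices produced by range(len(tokens)-1) are always in range,
-- so pyGetD with a default is exact here.
def get_symbol_freq (all_words : List String) : List (String × String × Int) :=
  let pairs : PySem.Dict (String × String) Int :=
    all_words.foldl (fun pairs word_tokens =>
      let tokens := PySem.Str.split₀ word_tokens
      (PySem.List.pyRange 0 ((tokens.length : Int) - 1) 1).foldl (fun pairs i =>
        if PySem.List.pyGetD tokens i "" = "|" ∨ PySem.List.pyGetD tokens (i + 1) "" = "|" then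
          pairs
        else
          let pair := (PySem.List.pyGetD tokens i "", PySem.List.pyGetD tokens (i + 1) "")
          pairs.insert pair (pairs.getD pair 0 + 1)) pairs) PySem.Dict.empty
  pairs.items.map (fun p => (p.1.1, p.1.2, p.2))

-- ===== PORT B =====
-- _runs: split a token list into the maximal runs of consecutive non-'|' tokens
def pvRunsGo (run : List String) : List String → List (List String)
  | [] => if run.isEmpty then [] else [run]
  | tok :: rest =>
      if tok = "|" then (if run.isEmpty then [] else [run]) ++ pvRunsGo [] rest
      else pvRunsGo (run ++ [tok]) rest

def get_symbol_freq_alt (all_words : List String) : List (String × String × Int) :=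
  let pairs : PySem.Dict (String × String) Int :=
    all_words.foldl (fun pairs word_tokens =>
      (pvRunsGo [] (PySem.Str.split₀ word_tokens)).foldl (fun pairs run =>
        (run.zip run.tail).foldl (fun pairs pair =>
          pairs.insert pair (pairs.getD pair 0 + 1)) pairs) pairs) PySem.Dict.empty
  pairs.items.map (fun p => (p.1.1, p.1.2, p.2))

-- ===== PRECONDITION & SPEC =====
def Spec_get_symbol_freq (all_words : List String) (out : List (String × String × Int)) : Prop := out = get_symbol_freq_alt all_words
instance (all_words : List String) (out : List (String × String × Int)) : Decidable (Spec_get_symbol_freq all_words out) := by unfold Spec_get_symbol_freq; infer_instance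

-- ===== CLAIM (what is proved, stated in full; the proofs are below) =====
def Claim_equal_get_symbol_freq : Prop := ∀ (all_words : List String), Dom_get_symbol_freq all_words → Spec_get_symbol_freq all_words (get_symbol_freq all_words)

-- ===== LEMMAS AND PROOFS =====

-- the filtered adjacent-pair sequence of a token list, as a recursion
def pvF : List String → List (String × String)
  | a :: b :: rest => (if a = "|" ∨ b = "|" then [] else [(a, b)]) ++ pvF (b :: rest)
  | _ => []

-- dict increment step, shared by both inner loops
def pvIncr (d : PySem.Dict (String × String) Int) (p : String × String) : PySem.Dict (String × String) Int :=
  d.insert p (d.getD p 0 + 1)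

lemma pvF_filter (l : List String) :
    pvF l = (l.zip l.tail).filter (fun p => !(p.1 = "|" ∨ p.2 = "|" : Bool)) := by
  match l with
  | [] => simp [pvF]
  | [a] => simp [pvF]
  | a :: b :: rest =>
    rw [pvF, pvF_filter (b :: rest)]
    by_cases h : a = "|" ∨ b = "|"
    · rcases h with h | h <;> simp [List.filter_cons, h]
    · push_neg at h
      simp [List.filter_cons, h.1, h.2]

lemma pvF_free (l : List String) (h : ∀ x ∈ l, x ≠ "|") :
    pvF l = l.zip l.tail := by
  match l with
  | [] => simp [pvF]
  | [a] => simp [pvF]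
  | a :: b :: rest =>
    have ha : a ≠ "|" := h a (by simp)
    have hb : b ≠ "|" := h b (by simp)
    rw [pvF, pvF_free (b :: rest) (fun x hx => h x (by simp [hx]))]
    simp [ha, hb]

lemma pvF_bar (rest : List String) : pvF ("|" :: rest) = pvF rest := by
  cases rest with
  | nil => simp [pvF]
  | cons b r => rw [pvF]; simp [pvF]

lemma pvF_split (acc rest : List String) (h : ∀ x ∈ acc, x ≠ "|") :
    pvF (acc ++ "|" :: rest) = pvF acc ++ pvF rest := by
  match acc with
  | [] => simp [pvF, pvF_bar]
  | [a] =>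
    have ha : a ≠ "|" := h a (by simp)
    simp [pvF, pvF_bar, ha]
  | a :: b :: t =>
    have ha : a ≠ "|" := h a (by simp)
    have hb : b ≠ "|" := h b (by simp)
    have ih := pvF_split (b :: t) rest (fun x hx => h x (by simp [hx]))
    simp only [List.cons_append] at ih ⊢
    rw [pvF, ih, pvF]
    simp [ha, hb]

lemma pvRuns_flatMap (tokens : List String) (acc : List String) (h : ∀ x ∈ acc, x ≠ "|") :
    (pvRunsGo acc tokens).flatMap (fun r => r.zip r.tail) = pvF (acc ++ tokens) := by
  induction tokens generalizing acc with
  | nil =>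
    rw [pvRunsGo]
    by_cases he : acc.isEmpty <;>
      simp_all [pvF_free acc h, List.isEmpty_iff]
    simp [pvF]
  | cons tok rest ih =>
    rw [pvRunsGo]
    by_cases ht : tok = "|"
    · rw [if_pos ht, List.flatMap_append, ih [] (by simp), ht, pvF_split acc rest h]
      simp only [List.nil_append]
      congr 1
      by_cases he : acc.isEmpty
      · have : acc = [] := List.isEmpty_iff.mp he
        subst this; simp [pvF]
      · have hne : acc ≠ [] := fun hh => he (by simp [hh])
        simp [hne, pvF_free acc h]
    · rw [if_neg ht]
      have hacc : ∀ x ∈ acc ++ [tok], x ≠ "|" := by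
        intro x hx
        rcases List.mem_append.mp hx with h1 | h1
        · exact h x h1
        · simp at h1; subst h1; exact ht
      rw [ih (acc ++ [tok]) hacc]
      simp

-- A's inner indexed loop equals folding pvIncr over pvF tokens
lemma pvFoldl_skip (ys : List (String × String)) (d : PySem.Dict (String × String) Int) :
    ys.foldl (fun acc p => if p.1 = "|" ∨ p.2 = "|" then acc else pvIncr acc p) d
    = (ys.filter (fun p => !(p.1 = "|" ∨ p.2 = "|" : Bool))).foldl pvIncr d := by
  induction ys generalizing d with
  | nil => rfl
  | cons p ps ih =>
    by_cases h : p.1 = "|" ∨ p.2 = "|" <;>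
      simp only [List.foldl_cons, List.filter_cons, h, decide_true, decide_false,
        Bool.not_true, Bool.not_false, ite_true, ite_false] <;>
      first
        | exact ih d
        | exact ih (pvIncr d p)

lemma innerA_eq (tokens : List String) (d : PySem.Dict (String × String) Int) :
    (PySem.List.pyRange 0 ((tokens.length : Int) - 1) 1).foldl (fun pairs i =>
        if PySem.List.pyGetD tokens i "" = "|" ∨ PySem.List.pyGetD tokens (i + 1) "" = "|" then
          pairs
        else
          pairs.insert (PySem.List.pyGetD tokens i "", PySem.List.pyGetD tokens (i + 1) "")
            ((pairs.getD (PySem.List.pyGetD tokens i "", PySem.List.pyGetD tokens (i + 1) "") 0) + 1))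
      d
    = (pvF tokens).foldl pvIncr d := by
  cases tokens with
  | nil => simp [PySem.List.pyRange_one_eq_nil, pvF]
  | cons t0 ts =>
    set l := t0 :: ts with hl
    set ys := l.zip l.tail with hys
    have hys_len : ys.length = ts.length := by
      rw [hys, hl]; simp
    have hlen : ((l.length : Int) - 1) = (ys.length : Int) := by
      rw [hys_len, hl]; simp only [List.length_cons]; push_cast; ring
    rw [hlen]
    have hstep : ∀ (acc : PySem.Dict (String × String) Int),
        ∀ i ∈ PySem.List.pyRange 0 (ys.length : Int) 1,
        (if PySem.List.pyGetD l i "" = "|" ∨ PySem.List.pyGetD l (i + 1) "" = "|" then acc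
         else acc.insert (PySem.List.pyGetD l i "", PySem.List.pyGetD l (i + 1) "")
            ((acc.getD (PySem.List.pyGetD l i "", PySem.List.pyGetD l (i + 1) "") 0) + 1))
        = (fun acc (p : String × String) =>
            if p.1 = "|" ∨ p.2 = "|" then acc else pvIncr acc p) acc
            (PySem.List.pyGetD ys i ("", "")) := by
      intro acc i hi
      rcases (PySem.List.mem_pyRange_one).mp hi with ⟨h0, h1⟩
      have hyl : i < (ys.length : Int) := h1
      have hsl : l.length = ts.length + 1 := by rw [hl]; simp
      have hil : i.toNat < l.length := by omega
      have hi1 : i.toNat + 1 < l.length := by omega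
      have hilZ : i < (l.length : Int) := by omega
      have hi1Z : i + 1 < (l.length : Int) := by omega
      have e1 : PySem.List.pyGetD ys i ("", "") =
          (l[i.toNat]'hil, l[i.toNat + 1]'hi1) := by
        rw [PySem.List.pyGetD_eq_getElem ys ("", "") h0 h1]
        simp [hys, List.getElem_zip, List.getElem_tail]
      have e2 : PySem.List.pyGetD l i "" = l[i.toNat]'hil :=
        PySem.List.pyGetD_eq_getElem l "" h0 hilZ
      have e3 : PySem.List.pyGetD l (i + 1) "" = l[i.toNat + 1]'hi1 := by
        rw [PySem.List.pyGetD_eq_getElem l "" (by omega) hi1Z]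
        congr 1
        omega
      rw [e1, e2, e3]
      simp [pvIncr]
    refine (PySem.List.foldl_congr_mem _ _ _ d hstep).trans ?_
    refine (PySem.List.foldl_pyRange_zero_pyGetD' ys ("", "")
      (fun acc (p : String × String) =>
        if p.1 = "|" ∨ p.2 = "|" then acc else pvIncr acc p) d).trans ?_
    rw [pvFoldl_skip, pvF_filter, ← hys]

-- B's inner loops equal folding pvIncr over pvF tokens
lemma innerB_eq (tokens : List String) (d : PySem.Dict (String × String) Int) :
    (pvRunsGo [] tokens).foldl (fun pairs run =>
        (run.zip run.tail).foldl (fun pairs pair =>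
          pairs.insert pair (pairs.getD pair 0 + 1)) pairs) d
    = (pvF tokens).foldl pvIncr d := by
  have h1 : ∀ (rs : List (List String)) (d : PySem.Dict (String × String) Int),
      rs.foldl (fun pairs run => (run.zip run.tail).foldl pvIncr pairs) d
      = (rs.flatMap (fun r => r.zip r.tail)).foldl pvIncr d := by
    intro rs
    induction rs with
    | nil => intro d; simp
    | cons r rs ih => intro d; simp [List.foldl_append, ih]
  refine (h1 (pvRunsGo [] tokens) d).trans ?_
  rw [pvRuns_flatMap tokens [] (by simp)]
  simp

-- ===== VERDICT (by name: the statement is the Claim_ definition above) =====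
theorem get_symbol_freq_spec : Claim_equal_get_symbol_freq := by
  intro all_words _
  unfold Spec_get_symbol_freq get_symbol_freq get_symbol_freq_alt
  have hfun : (fun (pairs : PySem.Dict (String × String) Int) (word_tokens : String) =>
      let tokens := PySem.Str.split₀ word_tokens
      (PySem.List.pyRange 0 ((tokens.length : Int) - 1) 1).foldl (fun pairs i =>
        if PySem.List.pyGetD tokens i "" = "|" ∨ PySem.List.pyGetD tokens (i + 1) "" = "|" then
          pairs
        else
          let pair := (PySem.List.pyGetD tokens i "", PySem.List.pyGetD tokens (i + 1) "")
          pairs.insert pair (pairs.getD pair 0 + 1)) pairs)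
    = (fun (pairs : PySem.Dict (String × String) Int) (word_tokens : String) =>
      (pvRunsGo [] (PySem.Str.split₀ word_tokens)).foldl (fun pairs run =>
        (run.zip run.tail).foldl (fun pairs pair =>
          pairs.insert pair (pairs.getD pair 0 + 1)) pairs) pairs) := by
    funext d w
    exact (innerA_eq (PySem.Str.split₀ w) d).trans (innerB_eq (PySem.Str.split₀ w) d).symm
  simp only [hfun]
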